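-- pv_equiv track=rewrite | github.com/ltfafei/py_Leetcode_study | Strings/5.countCut_strings.py | countCutStr
-- ===== SOURCE A (Python) =====
-- def countCutStr(string):
--     source = 0
--     for i in range(1, len(string) - 1):
--         l = string[0:i]  #左边分割
--         r = string[i:]   #右边分割
--         ls = l.count("0")   #左串计算0的个数
--         rs = r.count("1")   #右串计算1的个数
--         temp = ls + rs
--         #找到组合的最大分数
--         if temp > source:
--             source = temp
--     return source
-- ===== SOURCE B (Python) =====
-- def countCutStr(string):
--     # single pass: keep zeros in the left part and ones in the right part incrementally
--     ones = string.count("1")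
--     best = 0
--     zeros = 0
--     for c in string[:len(string) - 2]:
--         if c == "0":
--             zeros += 1
--         elif c == "1":
--             ones -= 1
--         s = zeros + ones
--         if s > best:
--             best = s
--     return best
-- ===== Notes on version B (the rewrite author's own statement) =====
-- stated objective: faster
-- what changed: Replaces the quadratic loop that re-slices and re-counts the whole string at every split point with a single pass maintaining running left-zero and right-one counts.
import Mathlib
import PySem

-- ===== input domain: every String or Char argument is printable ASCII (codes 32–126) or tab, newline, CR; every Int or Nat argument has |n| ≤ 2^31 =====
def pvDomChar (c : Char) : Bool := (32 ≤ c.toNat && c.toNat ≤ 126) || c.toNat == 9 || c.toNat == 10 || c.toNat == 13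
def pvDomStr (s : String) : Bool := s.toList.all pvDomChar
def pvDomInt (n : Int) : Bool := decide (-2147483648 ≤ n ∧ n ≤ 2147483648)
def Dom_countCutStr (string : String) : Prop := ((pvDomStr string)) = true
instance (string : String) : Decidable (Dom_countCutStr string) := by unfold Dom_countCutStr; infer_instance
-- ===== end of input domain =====

-- B replaces A's loop that re-slices and re-counts the whole string at every split point
-- with a single pass maintaining running counts (objective: faster).

-- ===== PORT A =====
def countCutStr (string : String) : Int :=
  (PySem.List.pyRange 1 (PySem.Str.len string - 1) 1).foldl
    (fun source i =>
      let l := PySem.Str.slice string (some 0) (some i)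
      let r := PySem.Str.slice string (some i) none
      let ls : Int := PySem.Str.count l "0"
      let rs : Int := PySem.Str.count r "1"
      let temp := ls + rs
      if temp > source then temp else source) 0

-- ===== PORT B =====
-- the body of B's for-loop (state = (best, zeros, ones))
def pvBStep (st : Int × Int × Int) (c : Char) : Int × Int × Int :=
  let zeros := if c = '0' then st.2.1 + 1 else st.2.1
  let ones := if c = '0' then st.2.2 else if c = '1' then st.2.2 - 1 else st.2.2
  let s := zeros + ones
  let best := if s > st.1 then s else st.1
  (best, zeros, ones)

def countCutStr_alt (string : String) : Int :=
  let ones : Int := PySem.Str.count string "1"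
  let pref := PySem.Str.slice string none (some (PySem.Str.len string - 2))
  (pref.toList.foldl pvBStep (0, 0, ones)).1

-- ===== PRECONDITION & SPEC =====
def Spec_countCutStr (string : String) (out : Int) : Prop := out = countCutStr_alt string
instance (string : String) (out : Int) : Decidable (Spec_countCutStr string out) := by unfold Spec_countCutStr; infer_instance

-- ===== CLAIM (what is proved, stated in full; the proofs are below) =====
def Claim_equal_countCutStr : Prop := ∀ (string : String), Dom_countCutStr string → Spec_countCutStr string (countCutStr string)

-- ===== LEMMAS AND PROOFS =====

-- the score of split point i, and the max-accumulating step, over the full char list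
def pvScore (cs : List Char) (i : ℕ) : Int := ((cs.take i).count '0' : Int) + ((cs.drop i).count '1' : Int)
def pvMx (cs : List Char) (s : Int) (i : ℕ) : Int := if pvScore cs i > s then pvScore cs i else s

lemma count_go_singleton (c : Char) : ∀ (l : List Char) (fuel acc : ℕ), l.length ≤ fuel →
    PySem.Chars.count.go [c] fuel l acc = acc + l.count c := by
  intro l
  induction l with
  | nil => intro fuel acc _; cases fuel <;> simp [PySem.Chars.count.go]
  | cons h t ih =>
    intro fuel acc hf
    cases fuel with
    | zero => simp at hf
    | succ f =>
      have hlen : t.length ≤ f := by simpa using hf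
      by_cases hc : c = h
      · subst hc
        simp [PySem.Chars.count.go, List.isPrefixOf, ih f (acc + 1) hlen]
        omega
      · simp [PySem.Chars.count.go, List.isPrefixOf, hc, Ne.symm hc, ih f acc hlen]

lemma chars_count_singleton (l : List Char) (c : Char) :
    PySem.Chars.count l [c] = l.count c := by
  simp [PySem.Chars.count, count_go_singleton c l l.length 0 le_rfl]

lemma take_append_cons (p t : List Char) (c : Char) :
    (p ++ c :: t).take (p.length + 1) = p ++ [c] := by
  simp [List.take_append]

lemma drop_append_cons (p t : List Char) (c : Char) :
    (p ++ c :: t).drop (p.length + 1) = t := by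
  simp [List.drop_append]

-- loop invariant for B's single pass
lemma bfold_inv (ws : List Char) : ∀ (p rest : List Char) (best : Int),
    ws.foldl pvBStep (best, ((p.count '0' : Int)), (((ws ++ rest).count '1' : Int)))
      = ((List.range' (p.length + 1) ws.length).foldl (pvMx (p ++ ws ++ rest)) best,
         (((p ++ ws).count '0' : Int)), ((rest.count '1' : Int))) := by
  induction ws with
  | nil => intro p rest best; simp
  | cons c ws ih =>
    intro p rest best
    have hz : (if c = '0' then ((p.count '0' : Int)) + 1 else ((p.count '0' : Int)))
        = (((p ++ [c]).count '0' : Int)) := by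
      by_cases hc : c = '0' <;> simp [hc, List.count_append]
    have ho : (if c = '0' then (((c :: ws ++ rest).count '1' : Int))
          else if c = '1' then (((c :: ws ++ rest).count '1' : Int)) - 1
          else (((c :: ws ++ rest).count '1' : Int)))
        = (((ws ++ rest).count '1' : Int)) := by
      by_cases hc : c = '0'
      · simp [hc]
      · by_cases hc1 : c = '1' <;> simp [hc, hc1]
    have hsc : pvScore (p ++ c :: (ws ++ rest)) (p.length + 1)
        = (((p ++ [c]).count '0' : Int)) + (((ws ++ rest).count '1' : Int)) := by
      rw [pvScore, take_append_cons, drop_append_cons]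
    have hstep : pvBStep (best, ((p.count '0' : Int)), (((c :: ws ++ rest).count '1' : Int))) c
        = (pvMx (p ++ c :: (ws ++ rest)) best (p.length + 1),
           (((p ++ [c]).count '0' : Int)), (((ws ++ rest).count '1' : Int))) := by
      simp only [pvBStep, pvMx, hsc, hz, ho]
    calc (c :: ws).foldl pvBStep (best, ((p.count '0' : Int)), (((c :: ws ++ rest).count '1' : Int)))
        = ws.foldl pvBStep (pvBStep (best, _, _) c) := rfl
      _ = _ := by
          rw [hstep, ih (p ++ [c]) rest]
          simp [List.range'_succ, List.append_assoc]

lemma slice_take (cs : List Char) :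
    PySem.Chars.slice cs none (some ((cs.length : Int) - 2)) = cs.take (cs.length - 2) := by
  by_cases h : 2 ≤ cs.length
  · rw [show ((cs.length : Int) - 2) = ((cs.length - 2 : ℕ) : Int) by omega,
      PySem.Chars.slice_eq_listSlice]
    exact PySem.List.slice_to_natCast cs (cs.length - 2)
  · rcases cs with _ | ⟨a, _ | ⟨b, t⟩⟩
    · simp [PySem.Chars.slice_eq_listSlice, PySem.List.slice]
    · simp [PySem.Chars.slice_eq_listSlice, PySem.List.slice, PySem.List.clampIdx]
    · simp at h

-- A's fold over the Int range equals the Nat-indexed max fold over split points 1 .. n-2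
lemma a_eq (string : String) :
    countCutStr string
      = (List.range' 1 (string.toList.length - 2)).foldl (pvMx string.toList) 0 := by
  have hfun : ∀ (s : Int) (k : ℕ),
      (fun (source : Int) (i : Int) =>
        let l := PySem.Str.slice string (some 0) (some i)
        let r := PySem.Str.slice string (some i) none
        let ls : Int := PySem.Str.count l "0"
        let rs : Int := PySem.Str.count r "1"
        let temp := ls + rs
        if temp > source then temp else source) s (1 + (k : Int))
      = pvMx string.toList s (1 + k) := by
    intro s k
    have hcast : (1 : Int) + (k : Int) = ((1 + k : ℕ) : Int) := by push_cast; ring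
    have hl : (PySem.Str.slice string (some 0) (some (1 + (k : Int)))).toList
        = string.toList.take (1 + k) := by
      rw [PySem.Str.toList_slice, PySem.Chars.slice_eq_listSlice, PySem.List.slice_zero_start,
        hcast, PySem.List.slice_to_natCast]
    have hr : (PySem.Str.slice string (some (1 + (k : Int))) none).toList
        = string.toList.drop (1 + k) := by
      rw [PySem.Str.toList_slice, PySem.Chars.slice_eq_listSlice, hcast,
        PySem.List.slice_from_natCast]
    simp only [pvMx, pvScore, PySem.Str.count_eq, hl, hr,
      show ("0" : String).toList = ['0'] from rfl,
      show ("1" : String).toList = ['1'] from rfl, chars_count_singleton]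
  unfold countCutStr
  rw [PySem.List.pyRange_one, List.foldl_map, List.range'_eq_map_range, List.foldl_map,
    show ((PySem.Str.len string - 1 - 1).toNat) = string.toList.length - 2 by
      rw [PySem.Str.len_eq]; omega]
  apply List.foldl_ext
  intro b a _
  exact hfun b a

-- B's single pass equals the same fold
lemma b_eq (string : String) :
    countCutStr_alt string
      = (List.range' 1 (string.toList.length - 2)).foldl (pvMx string.toList) 0 := by
  unfold countCutStr_alt
  have h1 : (PySem.Str.slice string none (some (PySem.Str.len string - 2))).toList
      = string.toList.take (string.toList.length - 2) := by
    rw [PySem.Str.toList_slice, PySem.Str.len_eq, slice_take]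
  have h2 : (PySem.Str.count string "1" : Int) = ((string.toList.count '1' : ℕ) : Int) := by
    rw [PySem.Str.count_eq, show ("1" : String).toList = ['1'] from rfl, chars_count_singleton]
  have h3 := bfold_inv (string.toList.take (string.toList.length - 2)) []
    (string.toList.drop (string.toList.length - 2)) 0
  simp only [List.take_append_drop, List.nil_append, List.count_nil, Nat.cast_zero,
    List.length_nil, Nat.zero_add, List.length_take] at h3
  simp only [h1, h2, h3]
  simp

-- ===== VERDICT (by name: the statement is the Claim_ definition above) =====
theorem countCutStr_spec : Claim_equal_countCutStr := by
  intro string _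
  unfold Spec_countCutStr
  rw [a_eq, b_eq]
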